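-- pv_equiv track=rewrite | github.com/kartikhth-byte/NjordHR | agent/updater.py | _pick_artifact
-- ===== SOURCE A (Python) =====
-- def _pick_artifact(artifacts, platform_name):
--     scoped = [a for a in artifacts if str(a.get("platform", "all")).lower() in {platform_name, "all"}]
--     if not scoped:
--         return None
--     if platform_name == "macos":
--         preferred = [a for a in scoped if str(a.get("name", "")).endswith("NjordHR-unsigned.pkg")]
--         if preferred:
--             return preferred[0]
--         pkgs = [a for a in scoped if str(a.get("name", "")).lower().endswith(".pkg")]
--         if pkgs:
--             return pkgs[0]
--     if platform_name == "windows":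
--         exe = [a for a in scoped if str(a.get("name", "")).lower().endswith(".exe")]
--         if exe:
--             return exe[0]
--         msi = [a for a in scoped if str(a.get("name", "")).lower().endswith(".msi")]
--         if msi:
--             return msi[0]
--     return scoped[0]
-- ===== SOURCE B (Python) =====
-- def _pick_artifact(artifacts, platform_name):
--     scoped = [a for a in artifacts if str(a.get("platform", "all")).lower() in {platform_name, "all"}]
--     if not scoped:
--         return None
--     if platform_name == "macos":
--         def rank(a):
--             name = str(a.get("name", ""))
--             if name.endswith("NjordHR-unsigned.pkg"):
--                 return 0
--             if name.lower().endswith(".pkg"):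
--                 return 1
--             return 2
--     elif platform_name == "windows":
--         def rank(a):
--             name = str(a.get("name", "")).lower()
--             if name.endswith(".exe"):
--                 return 0
--             if name.endswith(".msi"):
--                 return 1
--             return 2
--     else:
--         def rank(a):
--             return 0
--     return min(scoped, key=rank)
-- ===== Notes on version B (the rewrite author's own statement) =====
-- stated objective: alternative
-- what changed: Replaces A's cascade of per-suffix filter passes over scoped with a single min(scoped, key=rank) pass using a per-platform priority rank, relying on min's first-wins tie rule for first-match and scoped[0] fallback behaviour.
import Mathlib
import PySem

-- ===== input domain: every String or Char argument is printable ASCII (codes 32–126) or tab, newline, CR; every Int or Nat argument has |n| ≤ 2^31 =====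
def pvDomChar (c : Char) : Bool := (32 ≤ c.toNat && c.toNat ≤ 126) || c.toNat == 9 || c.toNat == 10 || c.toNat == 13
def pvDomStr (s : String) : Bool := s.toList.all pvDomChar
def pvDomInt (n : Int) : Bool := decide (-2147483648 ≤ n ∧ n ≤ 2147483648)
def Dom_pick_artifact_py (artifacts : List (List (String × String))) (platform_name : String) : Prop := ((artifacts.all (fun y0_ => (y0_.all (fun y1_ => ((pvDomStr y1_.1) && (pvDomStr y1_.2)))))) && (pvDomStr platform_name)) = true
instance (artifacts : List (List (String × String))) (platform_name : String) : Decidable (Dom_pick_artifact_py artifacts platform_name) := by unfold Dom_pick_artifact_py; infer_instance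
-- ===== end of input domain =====

-- ===== PORT A =====
-- B differs from A by replacing A's cascade of suffix-filter passes with one min-by-rank pass (objective: alternative decomposition).
-- shared dict primitive: str(a.get(k, d)) on a string-valued dict
def pvGetD (a : List (String × String)) (k d : String) : String :=
  (PySem.Dict.mk a).getD k d

def pick_artifact_py (artifacts : List (List (String × String))) (platform_name : String) : Option (List (String × String)) :=
  let scoped_ := artifacts.filter (fun a =>
    let p := PySem.Str.lower (pvGetD a "platform" "all")
    p == platform_name || p == "all")
  match scoped_ with
  | [] => none
  | s0 :: _ =>
    if platform_name == "macos" then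
      match scoped_.filter (fun a => PySem.Str.endswith (pvGetD a "name" "") "NjordHR-unsigned.pkg") with
      | p :: _ => some p
      | [] =>
        match scoped_.filter (fun a => PySem.Str.endswith (PySem.Str.lower (pvGetD a "name" "")) ".pkg") with
        | p :: _ => some p
        | [] => some s0
    else if platform_name == "windows" then
      match scoped_.filter (fun a => PySem.Str.endswith (PySem.Str.lower (pvGetD a "name" "")) ".exe") with
      | p :: _ => some p
      | [] =>
        match scoped_.filter (fun a => PySem.Str.endswith (PySem.Str.lower (pvGetD a "name" "")) ".msi") with
        | p :: _ => some p
        | [] => some s0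
    else some s0

-- ===== PORT B =====
def pvRankMac (a : List (String × String)) : Nat :=
  let name := pvGetD a "name" ""
  if PySem.Str.endswith name "NjordHR-unsigned.pkg" then 0
  else if PySem.Str.endswith (PySem.Str.lower name) ".pkg" then 1
  else 2

def pvRankWin (a : List (String × String)) : Nat :=
  let name := PySem.Str.lower (pvGetD a "name" "")
  if PySem.Str.endswith name ".exe" then 0
  else if PySem.Str.endswith name ".msi" then 1
  else 2

def pick_artifact_py_alt (artifacts : List (List (String × String))) (platform_name : String) : Option (List (String × String)) :=
  let scoped_ := artifacts.filter (fun a =>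
    let p := PySem.Str.lower (pvGetD a "platform" "all")
    p == platform_name || p == "all")
  match scoped_ with
  | [] => none
  | _ :: _ =>
    let rank : List (String × String) → Nat :=
      if platform_name == "macos" then pvRankMac
      else if platform_name == "windows" then pvRankWin
      else fun _ => 0
    PySem.List.min? scoped_ rank

-- ===== PRECONDITION & SPEC =====
def Spec_pick_artifact_py (artifacts : List (List (String × String))) (platform_name : String) (out : Option (List (String × String))) : Prop := out = pick_artifact_py_alt artifacts platform_name
instance (artifacts : List (List (String × String))) (platform_name : String) (out : Option (List (String × String))) : Decidable (Spec_pick_artifact_py artifacts platform_name out) := by unfold Spec_pick_artifact_py; infer_instance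

-- ===== CLAIM (what is proved, stated in full; the proofs are below) =====
def Claim_equal_pick_artifact_py : Prop := ∀ (artifacts : List (List (String × String))) (platform_name : String), Dom_pick_artifact_py artifacts platform_name → Spec_pick_artifact_py artifacts platform_name (pick_artifact_py artifacts platform_name)

-- ===== LEMMAS AND PROOFS =====

-- The running-minimum fold (Python min with key), started from a held element `best`,
-- yields: best if it has rank 0; else the first rank-0 element of l; else best if it has
-- rank ≤ 1; else the first rank-1 element of l; else best (ranks bounded by 2).
theorem pvMinFold_char {α : Type} (rank : α → Nat) (l : List α) (best : α)
    (hb : rank best ≤ 2) (hl : ∀ a ∈ l, rank a ≤ 2) :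
    PySem.List.min? (best :: l) rank =
      some (if rank best = 0 then best
        else (l.filter (fun a => rank a == 0)).head?.getD
          (if rank best ≤ 1 then best
           else (l.filter (fun a => rank a == 1)).head?.getD best)) := by
  induction l generalizing best with
  | nil => simp [PySem.List.min?]
  | cons y ys ih =>
    have hy : rank y ≤ 2 := hl y (by simp)
    have hys : ∀ a ∈ ys, rank a ≤ 2 := fun a ha => hl a (by simp [ha])
    have hstep : PySem.List.min? (best :: y :: ys) rank =
        PySem.List.min? ((if rank y < rank best then y else best) :: ys) rank := by
      simp only [PySem.List.min?, List.foldl_cons]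
      congr 1
      split_ifs <;> rfl
    rw [hstep]
    by_cases hlt : rank y < rank best
    · simp only [if_pos hlt]
      rw [ih y hy hys]
      congr 1
      have hb0 : rank best ≠ 0 := by omega
      rcases Nat.lt_or_ge (rank y) 1 with h0 | h1
      · -- rank y = 0
        have : rank y = 0 := by omega
        simp [List.filter, this, hb0]
      · -- rank y = 1, rank best = 2
        have hy1 : rank y = 1 := by omega
        have hb2 : rank best = 2 := by omega
        simp [List.filter, hy1, hb2]
    · simp only [if_neg hlt]
      rw [ih best hb hys]
      congr 1
      by_cases hb0 : rank best = 0
      · have hy0 : rank y = 0 ∨ rank y ≠ 0 := em _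
        simp [hb0]
      · rcases Nat.lt_or_ge (rank y) 1 with h0 | h1
        · omega  -- rank y = 0 < rank best impossible given ¬hlt and hb0
        · by_cases hy1 : rank y = 1
          · have hble : rank best ≤ 1 := by omega
            simp [List.filter, hb0, hy1, hble]
          · have hy2 : rank y = 2 := by omega
            simp [List.filter, hb0, hy2]

-- Python's min(
--   l, key=rank) with ranks bounded by 2 is A's cascade: first rank-0 element,
-- else first rank-1 element, else the head.
theorem pvMin?_cascade {α : Type} (rank : α → Nat) (l : List α)
    (hl : ∀ a ∈ l, rank a ≤ 2) :
    PySem.List.min? l rank =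
      match l.filter (fun a => rank a == 0) with
      | p :: _ => some p
      | [] =>
        match l.filter (fun a => rank a == 1) with
        | p :: _ => some p
        | [] => l.head? := by
  cases l with
  | nil => rfl
  | cons x xs =>
    have hx : rank x ≤ 2 := hl x (by simp)
    have hxs : ∀ a ∈ xs, rank a ≤ 2 := fun a ha => hl a (by simp [ha])
    rw [pvMinFold_char rank xs x hx hxs]
    rcases (by omega : rank x = 0 ∨ rank x = 1 ∨ rank x = 2) with h | h | h
    · simp [h]
    · cases hf : xs.filter (fun a => rank a == 0) <;>
        simp [h, hf]
    · cases hf : xs.filter (fun a => rank a == 0) <;>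
        cases hg : xs.filter (fun a => rank a == 1) <;>
          simp [h, hf, hg]

theorem pvRankMac_le : ∀ a, pvRankMac a ≤ 2 := by
  intro a; unfold pvRankMac; dsimp only; split_ifs <;> omega

theorem pvRankWin_le : ∀ a, pvRankWin a ≤ 2 := by
  intro a; unfold pvRankWin; dsimp only; split_ifs <;> omega

-- ===== VERDICT (by name: the statement is the Claim_ definition above) =====
theorem pick_artifact_py_spec : Claim_equal_pick_artifact_py := by
  intro artifacts platform_name _
  unfold Spec_pick_artifact_py pick_artifact_py pick_artifact_py_alt
  dsimp only
  cases hs : artifacts.filter (fun a =>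
      (PySem.Str.lower (pvGetD a "platform" "all") == platform_name ||
       PySem.Str.lower (pvGetD a "platform" "all") == "all")) with
  | nil => simp
  | cons s0 rest =>
    by_cases hm : platform_name = "macos"
    · subst hm
      simp only [BEq.rfl, if_true]
      rw [pvMin?_cascade pvRankMac (s0 :: rest) (fun a _ => pvRankMac_le a)]
      have hf0 : (s0 :: rest).filter
          (fun a => PySem.Str.endswith (pvGetD a "name" "") "NjordHR-unsigned.pkg") =
          (s0 :: rest).filter (fun a => pvRankMac a == 0) := by
        apply List.filter_congr
        intro a _
        unfold pvRankMac; dsimp only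
        cases hE : PySem.Str.endswith (pvGetD a "name" "") "NjordHR-unsigned.pkg" <;>
          split_ifs <;> simp_all
      rw [hf0]
      cases h0 : (s0 :: rest).filter (fun a => pvRankMac a == 0) with
      | cons p _ => simp
      | nil =>
        have hno : ∀ a ∈ (s0 :: rest), ¬ (pvRankMac a == 0) = true := by
          intro a ha
          have := List.filter_eq_nil_iff.mp h0 a ha
          simpa using this
        have hf1 : (s0 :: rest).filter
            (fun a => PySem.Str.endswith (PySem.Str.lower (pvGetD a "name" "")) ".pkg") =
            (s0 :: rest).filter (fun a => pvRankMac a == 1) := by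
          apply List.filter_congr
          intro a ha
          have hz := hno a ha
          unfold pvRankMac at hz ⊢; dsimp only at hz ⊢
          cases hE : PySem.Str.endswith (pvGetD a "name" "") "NjordHR-unsigned.pkg" with
          | true => rw [hE] at hz; simp at hz
          | false => split_ifs <;> simp_all
        rw [hf1]
        cases h1 : (s0 :: rest).filter (fun a => pvRankMac a == 1) <;> simp
    · by_cases hw : platform_name = "windows"
      · subst hw
        have hmb : (("windows" : String) == "macos") = false := by decide
        simp only [hmb, Bool.false_eq_true, if_false, BEq.rfl, if_true]
        rw [pvMin?_cascade pvRankWin (s0 :: rest) (fun a _ => pvRankWin_le a)]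
        have hf0 : (s0 :: rest).filter
            (fun a => PySem.Str.endswith (PySem.Str.lower (pvGetD a "name" "")) ".exe") =
            (s0 :: rest).filter (fun a => pvRankWin a == 0) := by
          apply List.filter_congr
          intro a _
          unfold pvRankWin; dsimp only
          cases hE : PySem.Str.endswith (PySem.Str.lower (pvGetD a "name" "")) ".exe" <;>
            split_ifs <;> simp_all
        rw [hf0]
        cases h0 : (s0 :: rest).filter (fun a => pvRankWin a == 0) with
        | cons p _ => simp
        | nil =>
          have hno : ∀ a ∈ (s0 :: rest), ¬ (pvRankWin a == 0) = true := by
            intro a ha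
            have := List.filter_eq_nil_iff.mp h0 a ha
            simpa using this
          have hf1 : (s0 :: rest).filter
              (fun a => PySem.Str.endswith (PySem.Str.lower (pvGetD a "name" "")) ".msi") =
              (s0 :: rest).filter (fun a => pvRankWin a == 1) := by
            apply List.filter_congr
            intro a ha
            have hz := hno a ha
            unfold pvRankWin at hz ⊢; dsimp only at hz ⊢
            cases hE : PySem.Str.endswith (PySem.Str.lower (pvGetD a "name" "")) ".exe" with
            | true => rw [hE] at hz; simp at hz
            | false => split_ifs <;> simp_all
          rw [hf1]
          cases h1 : (s0 :: rest).filter (fun a => pvRankWin a == 1) <;> simp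
      · have hmb : (platform_name == "macos") = false := by
          simpa using hm
        have hwb : (platform_name == "windows") = false := by
          simpa using hw
        simp only [hmb, hwb, Bool.false_eq_true, if_false]
        show _ = PySem.List.min? (s0 :: rest) (fun _ => 0)
        rw [pvMin?_cascade (fun _ => 0) (s0 :: rest) (fun _ _ => Nat.zero_le 2)]
        simp
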